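-- pv_equiv track=rewrite | github.com/zhaoying9105/time_chart_tool | src/time_chart_tool/cli/validators.py | parse_show_options
-- ===== SOURCE A (Python) =====
-- from typing import List, Dict
--
-- def parse_show_options(show_spec: str) -> Dict[str, bool]:
--     """
--     解析show选项
--
--     Args:
--         show_spec: show参数字符串，逗号分隔
--
--     Returns:
--         Dict[str, bool]: 各show选项的开关状态
--     """
--     valid_show_options = {
--         'dtype', 'shape', 'kernel-names', 'kernel-duration',
--         'timestamp', 'readable-timestamp', 'kernel-timestamp', 'name', 'call_stack'
--     }
--
--     show_options = {
--         'dtype': False,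
--         'shape': False,
--         'kernel_names': False,
--         'kernel_duration': False,
--         'timestamp': False,
--         'readable_timestamp': False,
--         'kernel_timestamp': False,
--         'name': False,
--         'call_stack': False
--     }
--
--     if not show_spec or not show_spec.strip():
--         return show_options
--
--     # 解析逗号分隔的选项
--     show_args = [arg.strip() for arg in show_spec.split(',')]
--
--     for arg in show_args:
--         if not arg:
--             continue
--         if arg not in valid_show_options:
--             raise ValueError(f"不支持的show选项: {arg}。支持的选项: {', '.join(sorted(valid_show_options))}")
--
--         if arg == 'kernel-names':
--             show_options['kernel_names'] = True
--         elif arg == 'kernel-duration':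
--             show_options['kernel_duration'] = True
--         elif arg == 'readable-timestamp':
--             show_options['readable_timestamp'] = True
--         elif arg == 'kernel-timestamp':
--             show_options['kernel_timestamp'] = True
--         else:
--             show_options[arg] = True
--
--     return show_options
-- ===== SOURCE B (Python) =====
-- _VALID = {
--     'dtype', 'shape', 'kernel-names', 'kernel-duration',
--     'timestamp', 'readable-timestamp', 'kernel-timestamp', 'name', 'call_stack'
-- }
--
-- _ALL_KEYS = ['dtype', 'shape', 'kernel_names', 'kernel_duration', 'timestamp',
--              'readable_timestamp', 'kernel_timestamp', 'name', 'call_stack']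
--
--
-- def parse_show_options(show_spec: str):
--     if not show_spec or not show_spec.strip():
--         tokens = []
--     else:
--         tokens = [a.strip() for a in show_spec.split(',')]
--     for t in tokens:
--         if t and t not in _VALID:
--             raise ValueError(f"不支持的show选项: {t}。支持的选项: {', '.join(sorted(_VALID))}")
--     # key-major projection: each flag is computed by its own scan of the tokens
--     return {k: any(t.replace('-', '_') == k for t in tokens) for k in _ALL_KEYS}
-- ===== Notes on version B (the rewrite author's own statement) =====
-- stated objective: alternative
-- what changed: Inverts the loop nesting: instead of one token-major pass mutating a prefilled all-False dict through an if/elif chain, B validates the tokens in a separate pass and then builds the result key-major, computing each of the nine flags by its own scan of the tokens (any(token.replace('-','_')==key)), with no mutable dict state at all.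
import Mathlib
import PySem

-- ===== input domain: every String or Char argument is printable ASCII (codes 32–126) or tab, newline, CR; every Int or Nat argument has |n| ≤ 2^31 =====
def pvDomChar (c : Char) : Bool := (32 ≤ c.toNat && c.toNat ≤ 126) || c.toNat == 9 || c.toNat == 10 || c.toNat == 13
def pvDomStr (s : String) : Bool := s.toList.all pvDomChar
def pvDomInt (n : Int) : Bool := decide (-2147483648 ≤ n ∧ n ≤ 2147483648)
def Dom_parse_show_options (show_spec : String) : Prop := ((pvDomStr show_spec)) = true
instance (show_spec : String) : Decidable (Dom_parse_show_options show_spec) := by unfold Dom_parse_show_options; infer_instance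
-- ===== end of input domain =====

-- B inverts the loop nesting: a validation pass, then a key-major projection that computes each
-- flag by its own scan of the tokens — no mutable dict state (objective: alternative; same cost).

-- the set of valid option spellings (shared vocabulary of both programs)
def pvValidOptions : List String :=
  ["dtype", "shape", "kernel-names", "kernel-duration",
   "timestamp", "readable-timestamp", "kernel-timestamp", "name", "call_stack"]

-- ===== PORT A =====
def pvAInit : PySem.Dict String Bool :=
  PySem.Dict.mk
    [("dtype", false), ("shape", false), ("kernel_names", false), ("kernel_duration", false),
     ("timestamp", false), ("readable_timestamp", false), ("kernel_timestamp", false),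
     ("name", false), ("call_stack", false)]

-- the 'for arg in show_args' loop; where Python raises ValueError (invalid arg) the port
-- stops and returns the current state — those inputs are outside Pre_parse_show_options
def pvALoop : List String → PySem.Dict String Bool → PySem.Dict String Bool
  | [], d => d
  | arg :: rest, d =>
    if arg = "" then pvALoop rest d
    else if arg ∉ pvValidOptions then d
    else if arg = "kernel-names" then pvALoop rest (d.insert "kernel_names" true)
    else if arg = "kernel-duration" then pvALoop rest (d.insert "kernel_duration" true)
    else if arg = "readable-timestamp" then pvALoop rest (d.insert "readable_timestamp" true)
    else if arg = "kernel-timestamp" then pvALoop rest (d.insert "kernel_timestamp" true)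
    else pvALoop rest (d.insert arg true)

def parse_show_options (show_spec : String) : List (String × Bool) :=
  if show_spec = "" ∨ PySem.Str.strip show_spec = "" then pvAInit.items
  else
    let show_args := (((PySem.Str.split? show_spec ",").getD [])).map PySem.Str.strip
    (pvALoop show_args pvAInit).items

-- ===== PORT B =====
def pvAllKeys : List String :=
  ["dtype", "shape", "kernel_names", "kernel_duration", "timestamp",
   "readable_timestamp", "kernel_timestamp", "name", "call_stack"]

-- B's validation pass; false means the Python raised ValueError (those inputs are outside Pre_)
def pvBValid : List String → Bool
  | [] => true
  | t :: rest => if t ≠ "" ∧ t ∉ pvValidOptions then false else pvBValid rest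

def parse_show_options_alt (show_spec : String) : List (String × Bool) :=
  let tokens : List String :=
    if show_spec = "" ∨ PySem.Str.strip show_spec = "" then []
    else (((PySem.Str.split? show_spec ",").getD [])).map PySem.Str.strip
  if pvBValid tokens = false then []   -- Python raises ValueError here (outside Pre_)
  else pvAllKeys.map (fun k => (k, tokens.any (fun t => PySem.Str.replace t "-" "_" == k)))

-- ===== PRECONDITION & SPEC =====
-- Pre_ excludes exactly the inputs on which A raises ValueError: a nonempty stripped
-- comma-piece that is not a valid show option (B raises the same ValueError there).
def Pre_parse_show_options (show_spec : String) : Prop :=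
  (show_spec = "" ∨ PySem.Str.strip show_spec = "") ∨
  ∀ a ∈ (((PySem.Str.split? show_spec ",").getD [])).map PySem.Str.strip, a = "" ∨ a ∈ pvValidOptions
instance (show_spec : String) : Decidable (Pre_parse_show_options show_spec) := by
  unfold Pre_parse_show_options; infer_instance

def pvWitness_parse_show_options : String := "dtype, kernel-names"

def Spec_parse_show_options (show_spec : String) (out : List (String × Bool)) : Prop := out = parse_show_options_alt show_spec
instance (show_spec : String) (out : List (String × Bool)) : Decidable (Spec_parse_show_options show_spec out) := by unfold Spec_parse_show_options; infer_instance

-- ===== CLAIM (what is proved, stated in full; the proofs are below) =====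
def Claim_equal_parse_show_options : Prop := ∀ (show_spec : String), Dom_parse_show_options show_spec → Pre_parse_show_options show_spec → Spec_parse_show_options show_spec (parse_show_options show_spec)

-- ===== LEMMAS AND PROOFS =====

-- dash-to-underscore canonical forms of the empty token and the nine valid spellings
lemma canon_empty : PySem.Str.replace "" "-" "_" = "" := by decide
lemma canon_dtype : PySem.Str.replace "dtype" "-" "_" = "dtype" := by decide
lemma canon_shape : PySem.Str.replace "shape" "-" "_" = "shape" := by decide
lemma canon_kn : PySem.Str.replace "kernel-names" "-" "_" = "kernel_names" := by decide
lemma canon_kd : PySem.Str.replace "kernel-duration" "-" "_" = "kernel_duration" := by decide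
lemma canon_ts : PySem.Str.replace "timestamp" "-" "_" = "timestamp" := by decide
lemma canon_rt : PySem.Str.replace "readable-timestamp" "-" "_" = "readable_timestamp" := by decide
lemma canon_kt : PySem.Str.replace "kernel-timestamp" "-" "_" = "kernel_timestamp" := by decide
lemma canon_name : PySem.Str.replace "name" "-" "_" = "name" := by decide
lemma canon_cs : PySem.Str.replace "call_stack" "-" "_" = "call_stack" := by decide

-- the dict state A maintains, written as a key-major table of an abstract flag function
def pvStateF (f : String → Bool) : PySem.Dict String Bool :=
  PySem.Dict.mk (pvAllKeys.map (fun k => (k, f k)))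

lemma pvStateF_congr (f g : String → Bool) (h : ∀ k ∈ pvAllKeys, f k = g k) :
    pvStateF f = pvStateF g := by
  unfold pvStateF pvAllKeys
  simp only [List.map]
  rw [h "dtype" (by decide), h "shape" (by decide), h "kernel_names" (by decide),
     h "kernel_duration" (by decide), h "timestamp" (by decide),
     h "readable_timestamp" (by decide), h "kernel_timestamp" (by decide),
     h "name" (by decide), h "call_stack" (by decide)]

lemma pvStateF_insert (f : String → Bool) (x : String) (hx : x ∈ pvAllKeys) :
    (pvStateF f).insert x true = pvStateF (fun k => f k || (x == k)) := by
  fin_cases hx <;>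
    simp [pvStateF, pvAllKeys, PySem.Dict.insert]

lemma pvLoop_eq (args : List String) (f : String → Bool)
    (hargs : ∀ a ∈ args, a = "" ∨ a ∈ pvValidOptions) :
    pvALoop args (pvStateF f) =
      pvStateF (fun k => f k || args.any (fun t => PySem.Str.replace t "-" "_" == k)) := by
  induction args generalizing f with
  | nil => exact pvStateF_congr _ _ (fun k _ => by simp)
  | cons a rest ih =>
    have ha := hargs a (List.mem_cons_self ..)
    have hrest : ∀ b ∈ rest, b = "" ∨ b ∈ pvValidOptions := fun b hb => hargs b (List.mem_cons_of_mem _ hb)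
    rcases ha with ha | ha
    · subst ha
      rw [pvALoop, if_pos rfl, ih _ hrest]
      exact pvStateF_congr _ _ (fun k hk => by
        fin_cases hk <;> simp [canon_empty])
    · fin_cases ha <;>
        · rw [pvALoop]
          repeat first | rw [if_neg (by decide)] | rw [if_pos (by decide)]
          rw [pvStateF_insert _ _ (by decide), ih _ hrest]
          exact pvStateF_congr _ _ (fun k hk => by
            fin_cases hk <;>
              simp [canon_dtype, canon_shape, canon_kn, canon_kd, canon_ts,
                    canon_rt, canon_kt, canon_name, canon_cs])

lemma pvBValid_of_ok (args : List String)
    (hargs : ∀ a ∈ args, a = "" ∨ a ∈ pvValidOptions) : pvBValid args = true := by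
  induction args with
  | nil => rfl
  | cons a rest ih =>
    have ha := hargs a (List.mem_cons_self ..)
    rw [pvBValid, if_neg (by tauto)]
    exact ih (fun b hb => hargs b (List.mem_cons_of_mem _ hb))

-- ===== VERDICT (by name: the statement is the Claim_ definition above) =====
theorem parse_show_options_spec : Claim_equal_parse_show_options := by
  intro s _ hpre
  unfold Spec_parse_show_options parse_show_options parse_show_options_alt
  by_cases hempty : s = "" ∨ PySem.Str.strip s = ""
  · simp only [hempty, if_pos]
    rfl
  · have hargs := hpre.resolve_left hempty
    simp only [hempty, if_neg, not_false_iff]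
    rw [pvBValid_of_ok _ hargs]
    have h0 : pvAInit = pvStateF (fun _ => false) := rfl
    rw [h0, pvLoop_eq _ _ hargs]
    simp only [Bool.false_or]
    rfl
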